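-- pv_equiv track=rewrite | github.com/pradneshfernandez/coreference-resolution | coref/eval/evaluate.py | _muc_partition_count
-- ===== SOURCE A (Python) =====
-- from typing import Dict, FrozenSet, List, Optional, Set, Tuple
--
-- MentionKey = Tuple[int, int, int]   # (sent_idx, start_tok, end_tok)
--
-- Clusters   = Dict[int, Set[MentionKey]]
--
-- def _muc_partition_count(cluster: Set[MentionKey], other_clusters: Clusters) -> int:
--     """
--     Number of partitions of *cluster* induced by *other_clusters*.
--
--     partition_count = number of distinct "other" clusters that contain at
--     least one mention from *cluster*.  Mentions not found in any other cluster
--     each form their own singleton partition (counts as +1 per orphan).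
--     """
--     seen: Set[int] = set()
--     orphans = 0
--     for mkey in cluster:
--         found = False
--         for cid, cset in other_clusters.items():
--             if mkey in cset:
--                 seen.add(cid)
--                 found = True
--                 break
--         if not found:
--             orphans += 1
--     return len(seen) + orphans
-- ===== SOURCE B (Python) =====
-- def _muc_partition_count(cluster, other_clusters):
--     """Inverted index mention -> first containing cluster id; then label every
--     mention in one O(1)-lookup pass and count distinct labels + unlabeled."""
--     index = {}
--     for cid, cset in other_clusters.items():
--         for m in cset:
--             index.setdefault(m, cid)
--     labels = [index.get(m) for m in cluster]
--     return len({c for c in labels if c is not None}) + labels.count(None)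
-- ===== Notes on version B (the rewrite author's own statement) =====
-- stated objective: faster
-- what changed: Replaced the per-mention linear scan over all other clusters by an inverted index mention->first-containing-cluster-id built once with setdefault; mentions are then labeled by one O(1) lookup each and the result is len(set of labels) + count of unlabeled.
import Mathlib
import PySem

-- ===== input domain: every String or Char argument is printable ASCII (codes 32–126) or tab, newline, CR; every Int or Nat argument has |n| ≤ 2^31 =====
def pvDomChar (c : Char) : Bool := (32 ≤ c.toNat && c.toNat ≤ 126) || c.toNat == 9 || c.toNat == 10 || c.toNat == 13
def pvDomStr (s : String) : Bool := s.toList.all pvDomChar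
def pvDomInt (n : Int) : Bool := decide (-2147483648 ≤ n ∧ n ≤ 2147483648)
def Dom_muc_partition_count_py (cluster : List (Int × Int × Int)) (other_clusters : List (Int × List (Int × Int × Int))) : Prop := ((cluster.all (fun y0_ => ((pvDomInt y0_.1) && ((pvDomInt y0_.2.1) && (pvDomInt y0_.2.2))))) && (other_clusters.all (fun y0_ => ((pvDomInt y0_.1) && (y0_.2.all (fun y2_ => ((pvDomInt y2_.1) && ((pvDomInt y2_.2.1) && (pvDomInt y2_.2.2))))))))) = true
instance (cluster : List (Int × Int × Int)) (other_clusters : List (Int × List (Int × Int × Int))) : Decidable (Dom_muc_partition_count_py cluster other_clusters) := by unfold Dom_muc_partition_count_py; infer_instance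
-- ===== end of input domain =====

-- B replaces A's per-mention scan over all other clusters by an inverted index
-- (mention -> first containing cluster id) built once; then each mention is labeled
-- by one lookup, and the answer is len(set of labels) + number of unlabeled mentions.

-- ===== PORT A =====
-- cluster is a Python set and other_clusters a Python dict: the ports read them
-- through PySem.Set.ofList / PySem.Dict.ofList, matching Python's construction.
-- The inner 'for … if mkey in cset: …; break' is the first pair whose set contains mkey.
def muc_partition_count_py (cluster : List (Int × Int × Int)) (other_clusters : List (Int × List (Int × Int × Int))) : Int :=
  let ocs := (PySem.Dict.ofList other_clusters).items
  let st := (PySem.Set.ofList cluster).foldl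
    (fun (st : PySem.Set Int × Int) mkey =>
      match ocs.find? (fun p => p.2.contains mkey) with
      | some p => (PySem.Set.add st.1 p.1, st.2)        -- seen.add(cid); found
      | none   => (st.1, st.2 + 1))                     -- orphans += 1
    (PySem.Set.empty, 0)
  (PySem.Set.len st.1 : Int) + st.2

-- ===== PORT B =====
def muc_partition_count_py_alt (cluster : List (Int × Int × Int)) (other_clusters : List (Int × List (Int × Int × Int))) : Int :=
  let index : PySem.Dict (Int × Int × Int) Int :=
    (PySem.Dict.ofList other_clusters).items.foldl
      (fun d p => p.2.foldl (fun d m => d.setdefault m p.1) d)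
      PySem.Dict.empty
  let labels := (PySem.Set.ofList cluster).map (fun m => index.get? m)
  (PySem.Set.len (PySem.Set.ofList (labels.filterMap id)) : Int) + (labels.count none : Int)

-- ===== PRECONDITION & SPEC =====
def Spec_muc_partition_count_py (cluster : List (Int × Int × Int)) (other_clusters : List (Int × List (Int × Int × Int))) (out : Int) : Prop := out = muc_partition_count_py_alt cluster other_clusters
instance (cluster : List (Int × Int × Int)) (other_clusters : List (Int × List (Int × Int × Int))) (out : Int) : Decidable (Spec_muc_partition_count_py cluster other_clusters out) := by unfold Spec_muc_partition_count_py; infer_instance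

-- ===== CLAIM =====
def Claim_equal_muc_partition_count_py : Prop := ∀ (cluster : List (Int × Int × Int)) (other_clusters : List (Int × List (Int × Int × Int))), Dom_muc_partition_count_py cluster other_clusters → Spec_muc_partition_count_py cluster other_clusters (muc_partition_count_py cluster other_clusters)

-- ===== LEMMAS AND PROOFS =====

-- One cluster's inner loop: setdefault inserts every mention at cid, first-wins.
theorem pv_inner_get? (cset : List (Int × Int × Int)) (cid : Int)
    (d : PySem.Dict (Int × Int × Int) Int) (m : Int × Int × Int) :
    (cset.foldl (fun d m => d.setdefault m cid) d).get? m =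
      match d.get? m with
      | some v => some v
      | none   => if cset.contains m then some cid else none := by
  induction cset generalizing d with
  | nil => cases h : d.get? m <;> simp_all
  | cons x xs ih =>
    simp only [List.foldl_cons, ih]
    by_cases hmx : m = x
    · subst hmx
      rw [PySem.Dict.get?_setdefault_self]
      cases h : d.get? m <;> simp
    · rw [PySem.Dict.get?_setdefault_of_ne d cid hmx]
      cases h : d.get? m <;> simp [hmx]

-- The full index lookup is the cid of the first pair whose set contains m.
theorem pv_index_get? (ocs : List (Int × List (Int × Int × Int))) (m : Int × Int × Int) :
    (ocs.foldl
      (fun d p => p.2.foldl (fun d m => d.setdefault m p.1) d)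
      PySem.Dict.empty).get? m =
    (ocs.find? (fun p => p.2.contains m)).map Prod.fst := by
  suffices h : ∀ (d : PySem.Dict (Int × Int × Int) Int),
      (ocs.foldl (fun d p => p.2.foldl (fun d m => d.setdefault m p.1) d) d).get? m =
      match d.get? m with
      | some v => some v
      | none   => (ocs.find? (fun p => p.2.contains m)).map Prod.fst by
    rw [h]; simp [PySem.Dict.get?_empty]
  induction ocs with
  | nil => intro d; cases h : d.get? m <;> simp_all
  | cons p ps ih =>
    intro d
    simp only [List.foldl_cons, ih, pv_inner_get?]
    cases h : d.get? m with
    | some v => simp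
    | none =>
      by_cases hc : m ∈ p.2
      · rw [List.find?_cons_of_pos (by simpa using hc)]
        simp [hc]
      · rw [List.find?_cons_of_neg (by simpa using hc)]
        simp [hc]

-- A's single fold over the mentions, split into its two components:
-- the seen-set is one fold, the orphan counter is a count of unmatched mentions.
theorem pv_foldA (ocs : List (Int × List (Int × Int × Int)))
    (ms : List (Int × Int × Int)) (seen : PySem.Set Int) (o : Int) :
    ms.foldl
      (fun (st : PySem.Set Int × Int) mkey =>
        match ocs.find? (fun p => p.2.contains mkey) with
        | some p => (PySem.Set.add st.1 p.1, st.2)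
        | none   => (st.1, st.2 + 1)) (seen, o)
    = (ms.foldl
        (fun s mkey =>
          match ocs.find? (fun p => p.2.contains mkey) with
          | some p => PySem.Set.add s p.1
          | none   => s) seen,
       o + ((ms.map (fun m => (ocs.find? (fun p => p.2.contains m)).map Prod.fst)).count none : Int)) := by
  induction ms generalizing seen o with
  | nil => simp
  | cons m ms ih =>
    simp only [List.foldl_cons, List.map_cons]
    cases h : ocs.find? (fun p => p.2.contains m) with
    | some p =>
      rw [ih]
      simp
    | none =>
      rw [ih]
      simp only [List.count_cons, Option.map_none]
      congr 1
      push_cast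
      simp
      ring
  
-- The seen-set fold equals set(filterMap of the first-cid lookup).
theorem pv_seen_fold (ocs : List (Int × List (Int × Int × Int)))
    (ms : List (Int × Int × Int)) (s : PySem.Set Int) :
    ms.foldl
      (fun s mkey =>
        match ocs.find? (fun p => p.2.contains mkey) with
        | some p => PySem.Set.add s p.1
        | none   => s) s
    = (ms.filterMap (fun m => (ocs.find? (fun p => p.2.contains m)).map Prod.fst)).foldl PySem.Set.add s := by
  induction ms generalizing s with
  | nil => simp
  | cons m ms ih =>
    simp only [List.foldl_cons, List.filterMap_cons]
    cases h : ocs.find? (fun p => p.2.contains m) with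
    | some p => exact ih (PySem.Set.add s p.1)
    | none => exact ih s

-- ===== VERDICT =====
theorem muc_partition_count_py_spec : Claim_equal_muc_partition_count_py := by
  intro cluster other_clusters _
  show _ = _
  unfold muc_partition_count_py muc_partition_count_py_alt
  simp only [pv_foldA, pv_seen_fold]
  have hidx : (fun m => ((PySem.Dict.ofList other_clusters).items.foldl
      (fun d p => p.2.foldl (fun d m => d.setdefault m p.1) d) PySem.Dict.empty).get? m)
      = (fun m => ((PySem.Dict.ofList other_clusters).items.find? (fun p => p.2.contains m)).map Prod.fst) := by
    funext m; exact pv_index_get? _ m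
  rw [hidx]
  simp only [List.filterMap_map, Function.id_comp, zero_add, PySem.Set.ofList_eq_foldl]
  rfl
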